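-- pv_equiv track=rewrite | github.com/ThomasTrepanier/log6307-final-project | data/pyscent/stackoverflow/code-dump/55615_122.py | summer_69
-- ===== SOURCE A (Python) =====
-- def summer_69(lst):
--   """Return the sum of the numbers in the array,
--      except ignore sections of numbers starting with a 6 and extending to the next 9
--      (every 6 will be followed by at least one 9). Return 0 for no numbers
--   """
--   if not lst:
--     return 0
--   else:
--     _sum = 0
--     active = True
--     for x in lst:
--       if active:
--         if x != 6:
--           _sum += x
--         else:
--           active = False
--       else:
--         if x == 9:
--           active = True
--     return _sum
-- ===== SOURCE B (Python) =====
-- def summer_69(lst):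
--     total = 0
--     while True:
--         if 6 not in lst:
--             return total + sum(lst)
--         p = lst.index(6)
--         rest = lst[p + 1:]
--         if 9 not in rest:
--             return total + sum(lst[:p])
--         total += sum(lst[:p])
--         lst = rest[rest.index(9) + 1:]
-- ===== Notes on version B (the rewrite author's own statement) =====
-- stated objective: alternative
-- what changed: Replaced the per-element active-flag state machine with a find-and-skip scan that uses list.index to locate each 6..9 section, sums the active slices between sections, and loops on the shrinking remainder of the list.
import Mathlib
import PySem

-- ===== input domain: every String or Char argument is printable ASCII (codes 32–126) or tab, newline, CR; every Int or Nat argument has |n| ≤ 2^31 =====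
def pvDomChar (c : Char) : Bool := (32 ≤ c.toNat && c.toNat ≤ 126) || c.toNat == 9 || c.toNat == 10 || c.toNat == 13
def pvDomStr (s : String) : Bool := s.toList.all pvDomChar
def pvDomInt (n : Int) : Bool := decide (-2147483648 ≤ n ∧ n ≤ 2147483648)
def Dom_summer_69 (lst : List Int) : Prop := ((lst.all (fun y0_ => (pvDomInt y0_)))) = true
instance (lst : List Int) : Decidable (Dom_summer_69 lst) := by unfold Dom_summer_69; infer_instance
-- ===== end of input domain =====

-- B replaces A's per-element active-flag state machine with a find-and-skip scan
-- (list.index locates each 6..9 section, slices between sections are summed); alternative decomposition, same cost.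

-- ===== PORT A =====
-- the loop body of A's for-loop, on state (_sum, active)
def stepA (st : Int × Bool) (x : Int) : Int × Bool :=
  if st.2 then
    if x ≠ 6 then (st.1 + x, st.2) else (st.1, false)
  else
    if x = 9 then (st.1, true) else st

def summer_69 (lst : List Int) : Int :=
  if lst = [] then 0
  else (lst.foldl stepA (0, true)).1

-- ===== PORT B =====
-- helpers for termination of B's while loop (cited by decreasing_by)
theorem altGo_dec1 {lst : List Int} {p : Nat} (h : PySem.List.index? lst 6 = some p) :
    (PySem.List.slice lst (some ((p : Int) + 1)) none).length < lst.length := by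
  obtain ⟨hp, -, -⟩ := PySem.List.getElem_of_index?_eq_some h
  have : ((p : Int) + 1) = (((p + 1 : Nat) : Int)) := by push_cast; ring
  rw [this, PySem.List.slice_from_natCast]
  simp only [List.length_drop]
  omega

theorem altGo_dec2 {lst rest : List Int} {p q : Nat}
    (h : PySem.List.index? lst 6 = some p)
    (hrest : rest = PySem.List.slice lst (some ((p : Int) + 1)) none)
    (h2 : PySem.List.index? rest 9 = some q) :
    (PySem.List.slice rest (some ((q : Int) + 1)) none).length < lst.length := by
  obtain ⟨hq, -, -⟩ := PySem.List.getElem_of_index?_eq_some h2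
  have e2 : ((q : Int) + 1) = (((q + 1 : Nat) : Int)) := by push_cast; ring
  rw [e2, PySem.List.slice_from_natCast]
  have := altGo_dec1 h
  rw [← hrest] at this
  simp only [List.length_drop]
  omega

-- B's while loop: state (total, lst)
def altGo (total : Int) (lst : List Int) : Int :=
  match h : PySem.List.index? lst 6 with
  | none => total + lst.sum                                  -- "6 not in lst": return total + sum(lst)
  | some p =>
    let rest := PySem.List.slice lst (some ((p : Int) + 1)) none   -- rest = lst[p+1:]
    match h2 : PySem.List.index? rest 9 with
    | none => total + (PySem.List.slice lst none (some (p : Int))).sum  -- "9 not in rest": return total + sum(lst[:p])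
    | some q =>
      altGo (total + (PySem.List.slice lst none (some (p : Int))).sum)
            (PySem.List.slice rest (some ((q : Int) + 1)) none)   -- lst = rest[rest.index(9)+1:]
termination_by lst.length
decreasing_by exact altGo_dec2 h rfl h2

def summer_69_alt (lst : List Int) : Int := altGo 0 lst

-- ===== PRECONDITION & SPEC =====
def Spec_summer_69 (lst : List Int) (out : Int) : Prop := out = summer_69_alt lst
instance (lst : List Int) (out : Int) : Decidable (Spec_summer_69 lst out) := by unfold Spec_summer_69; infer_instance

-- ===== CLAIM (what is proved, stated in full; the proofs are below) =====
def Claim_equal_summer_69 : Prop := ∀ (lst : List Int), Dom_summer_69 lst → Spec_summer_69 lst (summer_69 lst)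

-- ===== LEMMAS AND PROOFS =====
theorem foldl_stepA_true_of_not6 (l : List Int) (s : Int) (h : (6:Int) ∉ l) :
    l.foldl stepA (s, true) = (s + l.sum, true) := by
  induction l generalizing s with
  | nil => simp
  | cons x xs ih =>
    simp only [List.mem_cons, not_or] at h
    have hx : x ≠ 6 := fun he => h.1 he.symm
    simp [List.foldl_cons, stepA, hx, ih _ h.2, add_assoc]

theorem foldl_stepA_false_of_not9 (l : List Int) (s : Int) (h : (9:Int) ∉ l) :
    l.foldl stepA (s, false) = (s, false) := by
  induction l with
  | nil => simp
  | cons x xs ih =>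
    simp only [List.mem_cons, not_or] at h
    have hx : x ≠ 9 := fun he => h.1 he.symm
    simp only [List.foldl_cons, stepA, Bool.false_eq_true, if_false, if_neg hx]
    exact ih h.2

theorem foldl_stepA_eq_altGo : ∀ (n : Nat) (l : List Int) (s : Int), l.length ≤ n →
    (l.foldl stepA (s, true)).1 = altGo s l := by
  intro n
  induction n with
  | zero =>
    intro l s hl
    have : l = [] := List.eq_nil_of_length_eq_zero (Nat.le_zero.mp hl)
    subst this
    simp [altGo]
  | succ n ih =>
    intro l s hl
    rw [altGo]
    split
    next h =>
      have h6 : (6:Int) ∉ l := (PySem.List.index?_eq_none_iff l 6).mp h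
      rw [foldl_stepA_true_of_not6 l s h6]
    next p h =>
      obtain ⟨pre, suf, hsplit, hplen, hpre6⟩ := (PySem.List.index?_eq_some_iff l 6 p).mp h
      have e1 : ((p : Int) + 1) = (((p + 1 : Nat) : Int)) := by push_cast; ring
      have hrest : PySem.List.slice l (some ((p : Int) + 1)) none = suf := by
        rw [e1, PySem.List.slice_from_natCast, hsplit, ← hplen]; simp
      have htake : PySem.List.slice l none (some (p : Int)) = pre := by
        rw [PySem.List.slice_to_natCast, hsplit, ← hplen, List.take_left]
      subst hrest
      have hfold1 : l.foldl stepA (s, true)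
          = (PySem.List.slice l (some ((p : Int) + 1)) none).foldl stepA (s + pre.sum, false) := by
        conv_lhs => rw [hsplit]
        rw [List.foldl_append, foldl_stepA_true_of_not6 pre s hpre6, List.foldl_cons]
        simp [stepA]
      show (List.foldl stepA (s, true) l).1 =
          match h2 : PySem.List.index? (PySem.List.slice l (some ((p:Int) + 1)) none) 9 with
          | none => s + (PySem.List.slice l none (some (p:Int))).sum
          | some q => altGo (s + (PySem.List.slice l none (some (p:Int))).sum)
              (PySem.List.slice (PySem.List.slice l (some ((p:Int) + 1)) none) (some ((q:Int) + 1)) none)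
      split
      next h2 =>
        have h9 : (9:Int) ∉ PySem.List.slice l (some ((p : Int) + 1)) none :=
          (PySem.List.index?_eq_none_iff _ 9).mp h2
        rw [hfold1, foldl_stepA_false_of_not9 _ _ h9, htake]
      next q h2 =>
        obtain ⟨pre2, suf2, hsplit2, hqlen, hpre9⟩ := (PySem.List.index?_eq_some_iff _ 9 q).mp h2
        have e2 : ((q : Int) + 1) = (((q + 1 : Nat) : Int)) := by push_cast; ring
        have hrest2 : PySem.List.slice (PySem.List.slice l (some ((p : Int) + 1)) none) (some ((q : Int) + 1)) none = suf2 := by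
          rw [e2, PySem.List.slice_from_natCast, hsplit2, ← hqlen]; simp
        have hfold2 : (PySem.List.slice l (some ((p : Int) + 1)) none).foldl stepA (s + pre.sum, false)
            = suf2.foldl stepA (s + pre.sum, true) := by
          conv_lhs => rw [hsplit2]
          rw [List.foldl_append, foldl_stepA_false_of_not9 pre2 _ hpre9, List.foldl_cons]
          simp [stepA]
        have hlen : suf2.length ≤ n := by
          have h1 : l.length = pre.length + 1 + (PySem.List.slice l (some ((p : Int) + 1)) none).length := by
            conv_lhs => rw [hsplit]
            simp
            omega
          have h2' : (PySem.List.slice l (some ((p : Int) + 1)) none).length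
              = pre2.length + 1 + suf2.length := by
            rw [hsplit2]; simp; omega
          omega
        rw [hfold1, hfold2, htake, hrest2, ih suf2 _ hlen]

theorem summer69_main (lst : List Int) : summer_69 lst = summer_69_alt lst := by
  unfold summer_69 summer_69_alt
  split
  · subst ‹lst = []›
    simp [altGo]
  · exact foldl_stepA_eq_altGo lst.length lst 0 le_rfl

-- ===== VERDICT (by name: the statement is the Claim_ definition above) =====
theorem summer_69_spec : Claim_equal_summer_69 := by
  intro lst _
  unfold Spec_summer_69
  exact summer69_main lst
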